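-- pv_equiv track=rewrite | github.com/elmorem/context-cleaner | src/context_cleaner/services/service_orchestrator.py | _extract_port_from_command
-- ===== SOURCE A (Python) =====
-- from typing import Dict, List, Optional, Any, Callable
--
-- def _extract_port_from_command(command: List[str]) -> Optional[int]:
--     """Extract port number from command line arguments."""
--     if not command:
--         return None
--
--     try:
--         # Look for --port parameter
--         for i, arg in enumerate(command):
--             if arg == "--port" and i + 1 < len(command):
--                 return int(command[i + 1])
--             elif arg.startswith("--port="):
--                 return int(arg.split("=", 1)[1])
--
--         # Look for -p parameter
--         for i, arg in enumerate(command):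
--             if arg == "-p" and i + 1 < len(command):
--                 return int(command[i + 1])
--
--         return None
--     except (ValueError, IndexError):
--         return None
-- ===== SOURCE B (Python) =====
-- from typing import List, Optional
--
-- def _extract_port_from_command(command: List[str]) -> Optional[int]:
--     """Extract port number from command line arguments."""
--     opts = {}
--     for i, arg in enumerate(command):
--         if arg.startswith("--port="):
--             opts.setdefault("--port", arg[len("--port="):])
--         elif (arg == "--port" or arg == "-p") and i + 1 < len(command):
--             opts.setdefault(arg, command[i + 1])
--     value = opts.get("--port", opts.get("-p"))
--     if value is None:
--         return None
--     try:
--         return int(value)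
--     except ValueError:
--         return None
-- ===== Notes on version B (the rewrite author's own statement) =====
-- stated objective: idiomatic
-- what changed: A's two ordered early-return scans (then int() inside a try around the whole search) are replaced by a single pass that records the first '--port' and '-p' values in an options dict via setdefault, then picks '--port' over '-p' and converts once at the end.
import Mathlib
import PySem

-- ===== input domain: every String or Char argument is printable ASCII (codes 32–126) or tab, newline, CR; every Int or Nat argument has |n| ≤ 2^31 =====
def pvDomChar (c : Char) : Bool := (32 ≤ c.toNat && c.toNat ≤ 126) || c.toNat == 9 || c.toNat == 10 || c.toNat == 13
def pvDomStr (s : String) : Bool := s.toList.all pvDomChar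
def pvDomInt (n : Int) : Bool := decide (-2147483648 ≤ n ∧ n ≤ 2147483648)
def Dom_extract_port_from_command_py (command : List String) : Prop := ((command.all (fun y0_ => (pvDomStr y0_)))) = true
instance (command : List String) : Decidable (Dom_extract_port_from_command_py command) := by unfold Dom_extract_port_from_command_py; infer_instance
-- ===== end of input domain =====

-- B replaces A's two ordered early-return scans by one pass that indexes the first '--port'/'-p'
-- occurrences in an options dict (setdefault = first wins) and converts the chosen value at the
-- end; objective: idiomatic/alternative decomposition, same cost.

-- ===== PORT A =====
-- first 'for' loop: returns 'some r' when Python's loop returns (r = None on ValueError,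
-- caught by the surrounding try), 'none' when the loop falls through.
-- 'i + 1 < len(command)' at position i is 'rest ≠ []' and 'command[i+1]' is 'rest.head'.
def pvA_loop1 : List String → Option (Option Int)
  | [] => none
  | arg :: rest =>
    if arg = "--port" ∧ rest ≠ [] then
      some (PySem.Int.ofStr? (rest.headD ""))
    else if PySem.Str.startswith arg "--port=" then
      -- int(arg.split("=", 1)[1]); a failing int() or indexing is caught → returns None
      some (match PySem.Str.splitMax? arg "=" 1 with
            | some parts =>
              (match PySem.List.pyGet? parts 1 with
               | some s => PySem.Int.ofStr? s
               | none => none)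
            | none => none)
    else pvA_loop1 rest

-- second 'for' loop (the '-p' scan)
def pvA_loop2 : List String → Option (Option Int)
  | [] => none
  | arg :: rest =>
    if arg = "-p" ∧ rest ≠ [] then
      some (PySem.Int.ofStr? (rest.headD ""))
    else pvA_loop2 rest

def extract_port_from_command_py (command : List String) : Option Int :=
  if command.isEmpty then none
  else
    match pvA_loop1 command with
    | some r => r
    | none =>
      match pvA_loop2 command with
      | some r => r
      | none => none

-- ===== PORT B =====
-- the single pass building the options dict; arg[len("--port="):] is slice arg 7 none
def pvB_loop : List String → PySem.Dict String String → PySem.Dict String String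
  | [], opts => opts
  | arg :: rest, opts =>
    pvB_loop rest
      (if PySem.Str.startswith arg "--port=" then
         opts.setdefault "--port" (PySem.Str.slice arg (some 7) none)
       else if (arg = "--port" ∨ arg = "-p") ∧ rest ≠ [] then
         opts.setdefault arg (rest.headD "")
       else opts)

def extract_port_from_command_py_alt (command : List String) : Option Int :=
  let opts := pvB_loop command PySem.Dict.empty
  -- value = opts.get("--port", opts.get("-p"))
  match (opts.get? "--port").or (opts.get? "-p") with
  | some v => PySem.Int.ofStr? v   -- try: int(value) / except ValueError: None
  | none => none

-- ===== PRECONDITION & SPEC =====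
def Spec_extract_port_from_command_py (command : List String) (out : Option Int) : Prop := out = extract_port_from_command_py_alt command
instance (command : List String) (out : Option Int) : Decidable (Spec_extract_port_from_command_py command out) := by unfold Spec_extract_port_from_command_py; infer_instance

-- ===== CLAIM (what is proved, stated in full; the proofs are below) =====
def Claim_equal_extract_port_from_command_py : Prop := ∀ (command : List String), Dom_extract_port_from_command_py command → Spec_extract_port_from_command_py command (extract_port_from_command_py command)

-- ===== LEMMAS AND PROOFS =====

-- the first '--port'/'--port=' value A's loop 1 (resp. B's dict) selects, as a string
def pvFirstPort : List String → Option String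
  | [] => none
  | a :: r =>
    if a = "--port" ∧ r ≠ [] then some (r.headD "")
    else if PySem.Str.startswith a "--port=" then some (PySem.Str.slice a (some 7) none)
    else pvFirstPort r

-- the first '-p' value
def pvFirstP : List String → Option String
  | [] => none
  | a :: r =>
    if a = "-p" ∧ r ≠ [] then some (r.headD "")
    else pvFirstP r

lemma pv_go_m0 (t : List Char) (acc : List (List Char)) (fuel : Nat) :
    PySem.Chars.splitOnMax.go ['='] (fuel+1) 0 t [] acc = (t :: acc).reverse := by
  cases t <;> simp [PySem.Chars.splitOnMax.go]

lemma pv_go_step (c : Char) (rest cur : List Char) (acc : List (List Char)) (fuel : Nat)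
    (hc : c ≠ '=') :
    PySem.Chars.splitOnMax.go ['='] (fuel+1) 1 (c :: rest) cur acc
      = PySem.Chars.splitOnMax.go ['='] fuel 1 rest (c :: cur) acc := by
  simp [PySem.Chars.splitOnMax.go, List.isPrefixOf, Ne.symm hc]

lemma pv_split_port (t : List Char) :
    PySem.Chars.splitOnMax ('-'::'-'::'p'::'o'::'r'::'t'::'='::t) ['='] 1
      = [['-','-','p','o','r','t'], t] := by
  show PySem.Chars.splitOnMax.go ['='] ((('-'::'-'::'p'::'o'::'r'::'t'::'='::t).length)+1) 1 _ [] [] = _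
  simp only [List.length_cons]
  have h : t.length + 1 + 1 + 1 + 1 + 1 + 1 + 1 + 1 = ((((((t.length + 1)+1)+1)+1)+1)+1)+1+1 := by omega
  rw [h, pv_go_step _ _ _ _ _ (by decide), pv_go_step _ _ _ _ _ (by decide),
      pv_go_step _ _ _ _ _ (by decide), pv_go_step _ _ _ _ _ (by decide),
      pv_go_step _ _ _ _ _ (by decide), pv_go_step _ _ _ _ _ (by decide)]
  rw [show t.length + 1 + 1 = (t.length+1)+1 from rfl]
  simp only [PySem.Chars.splitOnMax.go, List.isPrefixOf]
  simp [pv_go_m0]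

-- A's split("=",1)[1] equals B's arg[7:] on an arg starting with "--port="
lemma pv_E_eq (a : String) (h : PySem.Str.startswith a "--port=" = true) :
    (match PySem.Str.splitMax? a "=" 1 with
     | some parts =>
       (match PySem.List.pyGet? parts 1 with
        | some s => PySem.Int.ofStr? s
        | none => none)
     | none => none) = PySem.Int.ofStr? (PySem.Str.slice a (some 7) none) := by
  simp [PySem.Str.startswith, PySem.Chars.startswith] at h
  obtain ⟨t, ht⟩ : ∃ t : List Char, a.toList = '-'::'-'::'p'::'o'::'r'::'t'::'='::t := by
    obtain ⟨t, ht⟩ := h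
    exact ⟨t, ht.symm⟩
  have hs : PySem.Str.splitMax? a "=" 1
      = some [String.ofList ['-','-','p','o','r','t'], String.ofList t] := by
    simp [PySem.Str.splitMax?, PySem.Chars.splitMax?, ht, pv_split_port]
  have hsl : PySem.Str.slice a (some 7) none = String.ofList t := by
    simp [PySem.Str.slice, ht, PySem.List.slice_from _ (by omega : (0:Int) ≤ 7)]
  rw [hs, hsl]
  simp [PySem.List.pyGet?, PySem.List.pyIdx?]

lemma pv_loop1_eq (l : List String) :
    pvA_loop1 l = (pvFirstPort l).map PySem.Int.ofStr? := by
  induction l with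
  | nil => rfl
  | cons a r ih =>
    simp only [pvA_loop1, pvFirstPort]
    split_ifs with h1 h2
    · simp
    · simp [pv_E_eq a h2]
    · simpa using ih

lemma pv_loop2_eq (l : List String) :
    pvA_loop2 l = (pvFirstP l).map PySem.Int.ofStr? := by
  induction l with
  | nil => rfl
  | cons a r ih =>
    simp only [pvA_loop2, pvFirstP]
    split_ifs with h1
    · simp
    · simpa using ih

lemma pvB_get_port (l : List String) (opts : PySem.Dict String String) :
    (pvB_loop l opts).get? "--port" = (opts.get? "--port").or (pvFirstPort l) := by
  induction l generalizing opts with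
  | nil => simp [pvB_loop, pvFirstPort]
  | cons a r ih =>
    simp only [pvB_loop, pvFirstPort]
    by_cases hsw : PySem.Str.startswith a "--port=" = true
    · have hne : a ≠ "--port" := by
        intro hh; rw [hh] at hsw; exact absurd hsw (by decide)
      rw [if_pos hsw, ih, PySem.Dict.get?_setdefault_self,
          if_neg (fun hc : a = "--port" ∧ r ≠ [] => hne hc.1), if_pos hsw]
      cases opts.get? "--port" <;> simp
    · rw [if_neg hsw]
      by_cases hc : (a = "--port" ∨ a = "-p") ∧ r ≠ []
      · rw [if_pos hc]
        rcases hc.1 with hp | hp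
        · subst hp
          rw [ih, PySem.Dict.get?_setdefault_self, if_pos ⟨rfl, hc.2⟩]
          cases opts.get? "--port" <;> simp
        · subst hp
          rw [ih, PySem.Dict.get?_setdefault_of_ne _ _ (by decide : ("--port":String) ≠ "-p"),
              if_neg (fun hh : ("-p":String) = "--port" ∧ r ≠ [] => absurd hh.1 (by decide)),
              if_neg hsw]
      · rw [if_neg hc, ih,
            if_neg (fun hh : a = "--port" ∧ r ≠ [] => hc ⟨Or.inl hh.1, hh.2⟩), if_neg hsw]

lemma pvB_get_p (l : List String) (opts : PySem.Dict String String) :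
    (pvB_loop l opts).get? "-p" = (opts.get? "-p").or (pvFirstP l) := by
  induction l generalizing opts with
  | nil => simp [pvB_loop, pvFirstP]
  | cons a r ih =>
    simp only [pvB_loop, pvFirstP]
    by_cases hsw : PySem.Str.startswith a "--port=" = true
    · have hne : a ≠ "-p" := by
        intro hh; rw [hh] at hsw; exact absurd hsw (by decide)
      rw [if_pos hsw, ih, PySem.Dict.get?_setdefault_of_ne _ _ (by decide : ("-p":String) ≠ "--port"),
          if_neg (fun hc : a = "-p" ∧ r ≠ [] => hne hc.1)]
    · rw [if_neg hsw]
      by_cases hc : (a = "--port" ∨ a = "-p") ∧ r ≠ []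
      · rw [if_pos hc]
        rcases hc.1 with hp | hp
        · subst hp
          rw [ih, PySem.Dict.get?_setdefault_of_ne _ _ (by decide : ("-p":String) ≠ "--port"),
              if_neg (fun hh : ("--port":String) = "-p" ∧ r ≠ [] => absurd hh.1 (by decide))]
        · subst hp
          rw [ih, PySem.Dict.get?_setdefault_self, if_pos ⟨rfl, hc.2⟩]
          cases opts.get? "-p" <;> simp
      · rw [if_neg hc, ih,
            if_neg (fun hh : a = "-p" ∧ r ≠ [] => hc ⟨Or.inr hh.1, hh.2⟩)]

-- ===== VERDICT (by name: the statement is the Claim_ definition above) =====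
theorem extract_port_from_command_py_spec : Claim_equal_extract_port_from_command_py := by
  unfold Claim_equal_extract_port_from_command_py Spec_extract_port_from_command_py
  intro command _
  unfold extract_port_from_command_py
  show _ = (match ((pvB_loop command PySem.Dict.empty).get? "--port").or
              ((pvB_loop command PySem.Dict.empty).get? "-p") with
            | some v => PySem.Int.ofStr? v
            | none => none)
  rw [pvB_get_port, pvB_get_p, pv_loop1_eq, pv_loop2_eq]
  simp only [PySem.Dict.get?_empty, Option.none_or]
  cases command with
  | nil => rfl
  | cons a r =>
    simp only [List.isEmpty_cons, Bool.false_eq_true, if_false]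
    cases h1 : pvFirstPort (a :: r) <;> cases h2 : pvFirstP (a :: r) <;> simp
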